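-- pv_equiv track=rewrite | github.com/vucml/online_experiments | experiments/block_cat/convert_data_milind.py | retrieve_block_indices
-- ===== SOURCE A (Python) =====
-- def retrieve_block_indices(participants_data: list[list[dict]]) -> list[int]:
--     """
--     Tracks block index over item-presentation trials across all participants.
--
--     Args:
--         participants_data: List of lists of dictionaries, where each inner list contains recorded entries for a participant and trial.
--
--     Returns:
--         Contains block index for a participant and trial combination.
--     """
--     block_ids = []
--     for participant_data in participants_data:
--         block_index = 1
--         for entry in participant_data:
--             if entry.get("trial_type") == "item-presentation":
--                 block_ids.append(block_index)
--                 block_index += 1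
--     return block_ids
-- ===== SOURCE B (Python) =====
-- def retrieve_block_indices(participants_data: list[list[dict]]) -> list[int]:
--     # Divide and conquer over participants: split the list in half, solve each
--     # half recursively, concatenate. Correct because participants contribute
--     # independent, concatenated segments. Base case: filter the matching
--     # entries of a single participant and emit the positions 1..len(matches).
--     if not participants_data:
--         return []
--     if len(participants_data) == 1:
--         matches = [e for e in participants_data[0]
--                    if e.get("trial_type") == "item-presentation"]
--         return list(range(1, len(matches) + 1))
--     mid = len(participants_data) // 2
--     return (retrieve_block_indices(participants_data[:mid])
--             + retrieve_block_indices(participants_data[mid:]))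
-- ===== Notes on version B (the rewrite author's own statement) =====
-- stated objective: alternative
-- what changed: Replaces A's nested loops with a running counter by a divide-and-conquer recursion: the participants list is split in half and the halves solved independently, with a base case that filters one participant's matching entries and emits range(1, len(matches)+1).
import Mathlib
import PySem

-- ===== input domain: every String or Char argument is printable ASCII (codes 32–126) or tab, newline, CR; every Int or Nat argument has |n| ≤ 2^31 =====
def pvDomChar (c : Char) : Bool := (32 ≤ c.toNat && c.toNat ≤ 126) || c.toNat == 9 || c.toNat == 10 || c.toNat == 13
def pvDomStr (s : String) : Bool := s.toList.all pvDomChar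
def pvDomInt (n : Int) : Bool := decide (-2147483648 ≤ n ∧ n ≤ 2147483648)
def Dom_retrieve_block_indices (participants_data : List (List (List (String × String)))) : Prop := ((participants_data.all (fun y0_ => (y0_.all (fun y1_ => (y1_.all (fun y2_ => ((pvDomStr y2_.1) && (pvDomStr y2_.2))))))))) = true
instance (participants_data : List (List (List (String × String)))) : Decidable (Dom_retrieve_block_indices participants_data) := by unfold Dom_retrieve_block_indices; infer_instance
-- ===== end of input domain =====

-- B replaces A's nested counter loops by a divide-and-conquer recursion over the participants list (objective: alternative).


-- ===== PORT A =====
-- literal port of A: outer loop over participants; inner loop keeps (block_ids, block_index),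
-- appends block_index and increments it for each entry with trial_type == "item-presentation"
def retrieve_block_indices (participants_data : List (List (List (String × String)))) : List Int :=
  participants_data.foldl
    (fun block_ids participant_data =>
      (participant_data.foldl
        (fun s entry =>
          if (PySem.Dict.mk entry).get? "trial_type" == some "item-presentation" then
            (s.1 ++ [s.2], s.2 + 1)
          else s)
        (block_ids, (1 : Int))).1)
    []

-- ===== PORT B =====
-- entry.get("trial_type") == "item-presentation"
def pvPred (entry : List (String × String)) : Bool :=
  (PySem.Dict.mk entry).get? "trial_type" == some "item-presentation"

-- divide and conquer: split the participants list in half, recurse, concatenate;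
-- base case filters one participant's matching entries and emits range(1, len+1)
def retrieve_block_indices_alt (participants_data : List (List (List (String × String)))) : List Int :=
  match participants_data with
  | [] => []
  | [p] => PySem.List.pyRange 1 (((p.filter pvPred).length : Int) + 1) 1
  | a :: b :: rest =>
      let mid := (a :: b :: rest).length / 2
      retrieve_block_indices_alt ((a :: b :: rest).take mid)
        ++ retrieve_block_indices_alt ((a :: b :: rest).drop mid)
termination_by participants_data.length
decreasing_by
  · simp only [List.length_take, List.length_cons]
    omega
  · simp only [List.length_drop, List.length_cons]
    omega

-- ===== PRECONDITION & SPEC =====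
def Spec_retrieve_block_indices (participants_data : List (List (List (String × String)))) (out : List Int) : Prop := out = retrieve_block_indices_alt participants_data
instance (participants_data : List (List (List (String × String)))) (out : List Int) : Decidable (Spec_retrieve_block_indices participants_data out) := by unfold Spec_retrieve_block_indices; infer_instance

-- ===== CLAIM =====
def Claim_equal_retrieve_block_indices : Prop := ∀ (participants_data : List (List (List (String × String)))), Dom_retrieve_block_indices participants_data → Spec_retrieve_block_indices participants_data (retrieve_block_indices participants_data)

-- ===== LEMMAS AND PROOFS =====

-- the per-participant segment both programs produce
def pvSeg (p : List (List (String × String))) : List Int :=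
  PySem.List.pyRange 1 (((p.filter pvPred).length : Int) + 1) 1

-- A's inner loop, started at counter k, appends exactly range(k, k + count)
theorem innerA_eq (l : List (List (String × String))) (acc : List Int) (k : Int) :
    l.foldl
      (fun s entry =>
        if (PySem.Dict.mk entry).get? "trial_type" == some "item-presentation" then
          (s.1 ++ [s.2], s.2 + 1)
        else s)
      (acc, k)
    = (acc ++ PySem.List.pyRange k (k + ((l.filter pvPred).length : Int)) 1,
       k + ((l.filter pvPred).length : Int)) := by
  induction l generalizing acc k with
  | nil => simp [PySem.List.pyRange_one_eq_nil le_rfl]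
  | cons e r ih =>
    simp only [List.foldl_cons, List.filter_cons]
    by_cases h : pvPred e
    · rw [if_pos (by simpa [pvPred] using h), ih]
      simp only [if_pos h, List.length_cons]
      have hc : (0 : Int) ≤ ((r.filter pvPred).length : Int) := Int.natCast_nonneg _
      have hlt : k < k + (((r.filter pvPred).length : Int) + 1) := by omega
      have hr := PySem.List.pyRange_one_cons hlt
      rw [show k + (((r.filter pvPred).length : Int) + 1)
            = k + 1 + ((r.filter pvPred).length : Int) by ring] at hr
      push_cast
      rw [show k + (((r.filter pvPred).length : Int) + 1)
            = k + 1 + ((r.filter pvPred).length : Int) by ring, hr]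
      simp [List.append_assoc]
    · rw [if_neg (by simpa [pvPred] using h), ih]
      simp only [if_neg h]

-- A equals the flatMap of per-participant segments
theorem portA_eq_flatMap (pd : List (List (List (String × String)))) :
    retrieve_block_indices pd = pd.flatMap pvSeg := by
  unfold retrieve_block_indices
  have hbody : ∀ (acc : List Int) (p : List (List (String × String))),
      (p.foldl
        (fun s entry =>
          if (PySem.Dict.mk entry).get? "trial_type" == some "item-presentation" then
            (s.1 ++ [s.2], s.2 + 1)
          else s)
        (acc, (1 : Int))).1 = acc ++ pvSeg p := by
    intro acc p
    rw [innerA_eq]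
    simp [pvSeg, add_comm]
  calc pd.foldl
        (fun block_ids participant_data =>
          (participant_data.foldl
            (fun s entry =>
              if (PySem.Dict.mk entry).get? "trial_type" == some "item-presentation" then
                (s.1 ++ [s.2], s.2 + 1)
              else s)
            (block_ids, (1 : Int))).1)
        []
      = pd.foldl (fun acc p => acc ++ pvSeg p) [] := by
        apply PySem.List.foldl_congr_mem
        intro acc p _
        exact hbody acc p
    _ = pd.flatMap pvSeg := by
        rw [PySem.List.foldl_append_eq_flatMap]
        simp

-- B equals the same flatMap, by the divide-and-conquer recursion
theorem portB_eq_flatMap (pd : List (List (List (String × String)))) :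
    retrieve_block_indices_alt pd = pd.flatMap pvSeg := by
  fun_induction retrieve_block_indices_alt pd with
  | case1 => simp
  | case2 p => simp [pvSeg]
  | case3 a b rest mid ih1 ih2 =>
    rw [ih1, ih2, ← List.flatMap_append, List.take_append_drop]

-- ===== VERDICT =====
theorem retrieve_block_indices_spec : Claim_equal_retrieve_block_indices := by
  intro pd _
  unfold Spec_retrieve_block_indices
  rw [portA_eq_flatMap, portB_eq_flatMap]
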